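-- pv_equiv track=rewrite | github.com/RANGSHOW/IntegStudy | PythonStudy/Algorithm/이것이 코딩테스트다/CHAPTER7. 이진 탐색/[완] 7-[2]. 부품 찾기.py | search_parts
-- ===== SOURCE A (Python) =====
-- def binary_search(arr, target, start, end):
--     if start > end:
--         return -1
--     mid = (start + end) // 2
--     if arr[mid] > target:
--         return binary_search(arr, target, start, mid-1)
--     elif arr[mid] == target:
--         return 1
--     else:
--         return binary_search(arr, target, mid+1, end)
--
-- def search_parts(stock_list, order_list) -> list:
--     res = []
--     stock_list.sort()
--     for part in order_list:
--         if binary_search(stock_list, part, 0, len(stock_list)-1) == 1: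
--             res.append('yes')
--         else:
--             res.append('no')
--     return res
-- ===== SOURCE B (Python) =====
-- def search_parts(stock_list, order_list) -> list:
--     stock_list.sort()  # kept: A mutates its argument in place
--     stock = set(stock_list)
--     return ['yes' if part in stock else 'no' for part in order_list]
-- ===== Notes on version B (the rewrite author's own statement) =====
-- stated objective: faster
-- what changed: Replaces the recursive binary search per order part with a hash-set built once and O(1) membership tests in a comprehension (the in-place sort of stock_list is kept for the caller-visible mutation).
import Mathlib
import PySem

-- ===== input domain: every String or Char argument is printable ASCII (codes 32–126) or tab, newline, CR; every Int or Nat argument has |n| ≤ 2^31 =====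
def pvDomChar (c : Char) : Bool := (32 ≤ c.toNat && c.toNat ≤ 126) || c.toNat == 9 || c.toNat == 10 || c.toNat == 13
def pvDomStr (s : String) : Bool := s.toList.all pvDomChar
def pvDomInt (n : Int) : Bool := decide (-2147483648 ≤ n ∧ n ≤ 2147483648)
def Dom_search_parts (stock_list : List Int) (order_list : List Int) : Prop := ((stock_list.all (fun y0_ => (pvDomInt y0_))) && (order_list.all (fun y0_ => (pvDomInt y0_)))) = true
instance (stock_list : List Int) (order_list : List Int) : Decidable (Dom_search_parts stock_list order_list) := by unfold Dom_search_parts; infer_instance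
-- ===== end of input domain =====

-- B replaces the per-part recursive binary search with a set built once and membership
-- tests (objective: idiomatic). Both versions sort stock_list in place in Python; the
-- equivalence proved here is about the RETURN value.

-- ===== PORT A =====
def binary_search (arr : List Int) (target : Int) (start : Int) (end_ : Int) : Int :=
  if h : start > end_ then -1
  else
    let mid := PySem.Int.floordiv (start + end_) 2
    match PySem.List.pyGet? arr mid with
    | none => -1  -- IndexError in Python; unreachable from search_parts' calls (index always in range)
    | some v =>
      if v > target then binary_search arr target start (mid - 1)
      else if v == target then 1
      else binary_search arr target (mid + 1) end_
termination_by (end_ - start + 1).toNat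
decreasing_by
  · have := PySem.Int.floordiv_two_mid_bounds (lo := start) (hi := end_) (by omega)
    omega
  · have := PySem.Int.floordiv_two_mid_bounds (lo := start) (hi := end_) (by omega)
    omega

def search_parts (stock_list : List Int) (order_list : List Int) : List String :=
  let sorted := PySem.List.sorted stock_list (fun x => x) false
  order_list.foldl
    (fun res part =>
      res ++ [if binary_search sorted part 0 ((sorted.length : Int) - 1) == 1 then "yes" else "no"])
    []

-- ===== PORT B =====
def search_parts_alt (stock_list : List Int) (order_list : List Int) : List String :=
  let sorted := PySem.List.sorted stock_list (fun x => x) false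
  let stock := PySem.Set.ofList sorted
  order_list.map (fun part => if part ∈ stock then "yes" else "no")

-- ===== PRECONDITION & SPEC =====
def Spec_search_parts (stock_list : List Int) (order_list : List Int) (out : List String) : Prop := out = search_parts_alt stock_list order_list
instance (stock_list : List Int) (order_list : List Int) (out : List String) : Decidable (Spec_search_parts stock_list order_list out) := by unfold Spec_search_parts; infer_instance

-- ===== CLAIM (what is proved, stated in full; the proofs are below) =====
def Claim_equal_search_parts : Prop := ∀ (stock_list : List Int) (order_list : List Int), Dom_search_parts stock_list order_list → Spec_search_parts stock_list order_list (search_parts stock_list order_list)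

-- ===== LEMMAS AND PROOFS =====

-- monotone access on a ≤-sorted list
theorem sorted_getElem_le (arr : List Int) (hs : arr.Pairwise (· ≤ ·))
    {i j : Nat} (hij : i ≤ j) (hj : j < arr.length) : arr[i]'(by omega) ≤ arr[j] := by
  rcases Nat.lt_or_ge i j with h | h
  · exact (List.pairwise_iff_getElem.mp hs) i j (by omega) hj h
  · have : i = j := by omega
    subst this; exact le_refl _

-- binary search on a sorted list answers membership in the index window
theorem binary_search_correct (arr : List Int) (t : Int) :
    ∀ (start end_ : Int), arr.Pairwise (· ≤ ·) → 0 ≤ start → end_ < arr.length →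
    (binary_search arr t start end_ = 1 ↔
      ∃ i : Nat, start ≤ (i : Int) ∧ (i : Int) ≤ end_ ∧ arr[i]? = some t) := by
  intro start end_ hs h0 hend
  induction start, end_ using binary_search.induct arr t with
  | case1 start end_ hgt =>
    rw [binary_search]; simp only [dif_pos hgt]
    constructor
    · intro h; omega
    · rintro ⟨i, h1, h2, _⟩; omega
  | case2 start end_ hle mid hmid =>
    exfalso
    have hm : mid = PySem.Int.floordiv (start + end_) 2 := rfl
    have hb := PySem.Int.floordiv_two_mid_bounds (lo := start) (hi := end_) (by omega)
    rw [← hm] at hb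
    have := PySem.List.pyGet?_eq_some_getElem (xs := arr) (i := mid) (by omega) (by omega)
    rw [this] at hmid; simp at hmid
  | case3 start end_ hle mid v hv hgt ih =>
    have hm : mid = PySem.Int.floordiv (start + end_) 2 := rfl
    have hb := PySem.Int.floordiv_two_mid_bounds (lo := start) (hi := end_) (by omega)
    rw [← hm] at hb
    have hvv : arr[mid.toNat]'(by omega) = v := by
      have hg := PySem.List.pyGet?_eq_some_getElem (xs := arr) (i := mid) (by omega) (by omega)
      rw [hg] at hv; exact Option.some.inj hv
    rw [binary_search]
    simp only [dif_neg hle, ← hm, hv, if_pos hgt]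
    rw [ih h0 (by omega)]
    constructor
    · rintro ⟨i, h1, h2, h3⟩; exact ⟨i, h1, by omega, h3⟩
    · rintro ⟨i, h1, h2, h3⟩
      refine ⟨i, h1, ?_, h3⟩
      by_contra hc
      have hi : i < arr.length := by omega
      have hival : arr[i]'hi = t := by
        have := List.getElem?_eq_getElem hi
        rw [this] at h3; exact Option.some.inj h3
      have hmi : mid.toNat ≤ i := by omega
      have := sorted_getElem_le arr hs hmi hi
      rw [hvv, hival] at this; omega
  | case4 start end_ hle mid v hv hngt heq =>
    have hm : mid = PySem.Int.floordiv (start + end_) 2 := rfl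
    have hb := PySem.Int.floordiv_two_mid_bounds (lo := start) (hi := end_) (by omega)
    rw [← hm] at hb
    have hvv : arr[mid.toNat]'(by omega) = v := by
      have hg := PySem.List.pyGet?_eq_some_getElem (xs := arr) (i := mid) (by omega) (by omega)
      rw [hg] at hv; exact Option.some.inj hv
    rw [binary_search]
    simp only [dif_neg hle, ← hm, hv, if_neg hngt, if_pos heq]
    simp only [true_iff]
    refine ⟨mid.toNat, by omega, by omega, ?_⟩
    rw [List.getElem?_eq_getElem (by omega : mid.toNat < arr.length), hvv]
    exact congrArg some (beq_iff_eq.mp heq)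
  | case5 start end_ hle mid v hv hngt hne ih =>
    have hm : mid = PySem.Int.floordiv (start + end_) 2 := rfl
    have hb := PySem.Int.floordiv_two_mid_bounds (lo := start) (hi := end_) (by omega)
    rw [← hm] at hb
    have hvv : arr[mid.toNat]'(by omega) = v := by
      have hg := PySem.List.pyGet?_eq_some_getElem (xs := arr) (i := mid) (by omega) (by omega)
      rw [hg] at hv; exact Option.some.inj hv
    rw [binary_search]
    simp only [dif_neg hle, ← hm, hv, if_neg hngt, if_neg hne]
    rw [ih (by omega) hend]
    have hvne : v ≠ t := by simpa using hne
    constructor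
    · rintro ⟨i, h1, h2, h3⟩; exact ⟨i, by omega, h2, h3⟩
    · rintro ⟨i, h1, h2, h3⟩
      refine ⟨i, ?_, h2, h3⟩
      by_contra hc
      have hi : i < arr.length := by omega
      have hival : arr[i]'hi = t := by
        have := List.getElem?_eq_getElem hi
        rw [this] at h3; exact Option.some.inj h3
      have hmi : i ≤ mid.toNat := by omega
      have := sorted_getElem_le arr hs hmi (by omega)
      rw [hvv, hival] at this
      exact hvne (by omega)

theorem binary_search_mem (arr : List Int) (t : Int) (hs : arr.Pairwise (· ≤ ·)) :
    (binary_search arr t 0 ((arr.length : Int) - 1) = 1 ↔ t ∈ arr) := by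
  rw [binary_search_correct arr t 0 ((arr.length : Int) - 1) hs (le_refl 0) (by omega)]
  constructor
  · rintro ⟨i, _, h2, h3⟩
    exact List.mem_of_getElem? h3
  · intro hm
    obtain ⟨i, hi, hval⟩ := List.mem_iff_getElem.mp hm
    exact ⟨i, by omega, by omega, by rw [List.getElem?_eq_getElem hi, hval]⟩

-- ===== VERDICT (by name: the statement is the Claim_ definition above) =====
theorem search_parts_spec : Claim_equal_search_parts := by
  intro stock_list order_list _
  unfold Spec_search_parts search_parts search_parts_alt
  rw [PySem.List.foldl_append_singleton_eq_map]
  apply List.map_congr_left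
  intro part _
  have hs : (PySem.List.sorted stock_list (fun x => x) false).Pairwise (· ≤ ·) := by
    simpa using PySem.List.sorted_pairwise (xs := stock_list) (key := fun x => x)
  have hmem := binary_search_mem (PySem.List.sorted stock_list (fun x => x) false) part hs
  by_cases hp : part ∈ PySem.List.sorted stock_list (fun x => x) false
  · rw [if_pos (by simpa using hmem.mpr hp), if_pos (by simpa [PySem.Set.mem_ofList] using hp)]
  · rw [if_neg (by simpa using fun h => hp (hmem.mp h)), if_neg (by simpa [PySem.Set.mem_ofList] using hp)]
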